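-- pv_equiv track=rewrite | github.com/star-tohoku/star-analyzer | script/sync_cursor_skills.py | parse_title_and_summary
-- ===== SOURCE A (Python) =====
-- def parse_title_and_summary(source_text: str, fallback_name: str) -> tuple[str, str]:
--     lines = source_text.splitlines()
--     title = fallback_name
--     for line in lines:
--         if line.startswith("# "):
--             title = line[2:].strip()
--             break
--
--     summary = ""
--     saw_title = False
--     for line in lines:
--         if line.startswith("# "):
--             saw_title = True
--             continue
--         if not saw_title:
--             continue
--         stripped = line.strip()
--         if not stripped or stripped.startswith("#"):
--             continue
--         summary = stripped
--         break
--     return title, summary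
-- ===== SOURCE B (Python) =====
-- def parse_title_and_summary(source_text: str, fallback_name: str) -> tuple[str, str]:
--     title, found = fallback_name, False
--     for line in source_text.splitlines():
--         if line.startswith("# "):
--             if not found:
--                 title = line[2:].strip()
--                 found = True
--         elif found:
--             s = line.strip()
--             if s and not s.startswith("#"):
--                 return title, s
--     return title, ""
-- ===== Notes on version B (the rewrite author's own statement) =====
-- stated objective: simpler
-- what changed: Fused A's two sequential scans over the lines into a single pass with one 'found' flag that sets the title at the first '# ' heading and returns the first non-empty non-'#' stripped line after it.
import Mathlib
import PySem

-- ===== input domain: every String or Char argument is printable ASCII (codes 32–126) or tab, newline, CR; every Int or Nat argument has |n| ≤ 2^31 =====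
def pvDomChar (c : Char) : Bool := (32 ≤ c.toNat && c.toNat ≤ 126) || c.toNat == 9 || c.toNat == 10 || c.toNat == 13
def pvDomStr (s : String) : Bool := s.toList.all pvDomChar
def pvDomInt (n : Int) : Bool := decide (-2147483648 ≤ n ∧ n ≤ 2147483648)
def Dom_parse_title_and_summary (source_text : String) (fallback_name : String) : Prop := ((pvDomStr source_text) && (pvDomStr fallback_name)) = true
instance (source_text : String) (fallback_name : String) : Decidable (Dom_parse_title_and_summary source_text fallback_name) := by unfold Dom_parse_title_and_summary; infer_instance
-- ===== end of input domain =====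

-- B fuses A's two scans over the lines into a single pass with one flag and an early return (simpler).

-- ===== PORT A =====
-- A's first loop: title from the first '# ' heading, break; else keep fallback.
def pvTitleLoop (lines : List String) (title : String) : String :=
  match lines with
  | [] => title
  | l :: ls =>
    if PySem.Str.startswith l "# " then PySem.Str.strip (PySem.Str.slice l (some 2) none)
    else pvTitleLoop ls title

-- A's second loop: after any '# ' line, first stripped line that is non-empty and not starting '#'.
def pvSummaryLoop (lines : List String) (saw_title : Bool) : String :=
  match lines with
  | [] => ""
  | l :: ls =>
    if PySem.Str.startswith l "# " then pvSummaryLoop ls true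
    else if !saw_title then pvSummaryLoop ls saw_title
    else
      let stripped := PySem.Str.strip l
      if stripped == "" || PySem.Str.startswith stripped "#" then pvSummaryLoop ls saw_title
      else stripped

def parse_title_and_summary (source_text : String) (fallback_name : String) : String × String :=
  let lines := PySem.Str.splitlines source_text
  (pvTitleLoop lines fallback_name, pvSummaryLoop lines false)

-- ===== PORT B =====
-- B's single pass with one 'found' flag and early return.
def pvBLoop (lines : List String) (title : String) (found : Bool) : String × String :=
  match lines with
  | [] => (title, "")
  | l :: ls =>
    if PySem.Str.startswith l "# " then
      if !found then pvBLoop ls (PySem.Str.strip (PySem.Str.slice l (some 2) none)) true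
      else pvBLoop ls title found
    else if found then
      let s := PySem.Str.strip l
      if s != "" && !(PySem.Str.startswith s "#") then (title, s) else pvBLoop ls title found
    else pvBLoop ls title found

def parse_title_and_summary_alt (source_text : String) (fallback_name : String) : String × String :=
  pvBLoop (PySem.Str.splitlines source_text) fallback_name false

-- ===== PRECONDITION & SPEC =====
def Spec_parse_title_and_summary (source_text : String) (fallback_name : String) (out : String × String) : Prop := out = parse_title_and_summary_alt source_text fallback_name
instance (source_text : String) (fallback_name : String) (out : String × String) : Decidable (Spec_parse_title_and_summary source_text fallback_name out) := by unfold Spec_parse_title_and_summary; infer_instance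

-- ===== CLAIM (what is proved, stated in full; the proofs are below) =====
def Claim_equal_parse_title_and_summary : Prop := ∀ (source_text : String) (fallback_name : String), Dom_parse_title_and_summary source_text fallback_name → Spec_parse_title_and_summary source_text fallback_name (parse_title_and_summary source_text fallback_name)

-- ===== LEMMAS AND PROOFS =====
-- Once the flag is set, B never changes the title and behaves like A's second loop with saw_title = true.
lemma pvBLoop_true (lines : List String) (t : String) :
    pvBLoop lines t true = (t, pvSummaryLoop lines true) := by
  induction lines generalizing t with
  | nil => rfl
  | cons l ls ih =>
    by_cases h1 : PySem.Chars.startswith l.toList ['#', ' '] = true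
    · simp [pvBLoop, pvSummaryLoop, h1, ih]
    · by_cases h2 : PySem.Str.strip l = ""
      · simp [pvBLoop, pvSummaryLoop, h1, h2, ih]
      · by_cases h3 : PySem.Chars.startswith (PySem.Chars.strip l.toList) ['#'] = true
        · simp [pvBLoop, pvSummaryLoop, h1, h3, ih]
        · simp [pvBLoop, pvSummaryLoop, h1, h2, h3]

-- While the flag is unset, B computes A's two loops in lockstep.
lemma pvBLoop_false (lines : List String) (t : String) :
    pvBLoop lines t false = (pvTitleLoop lines t, pvSummaryLoop lines false) := by
  induction lines generalizing t with
  | nil => rfl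
  | cons l ls ih =>
    by_cases h1 : PySem.Chars.startswith l.toList ['#', ' '] = true
    · simp [pvBLoop, pvTitleLoop, pvSummaryLoop, h1, pvBLoop_true]
    · simp [pvBLoop, pvTitleLoop, pvSummaryLoop, h1, ih]

-- ===== VERDICT (by name: the statement is the Claim_ definition above) =====
theorem parse_title_and_summary_spec : Claim_equal_parse_title_and_summary := by
  intro source_text fallback_name _
  unfold Spec_parse_title_and_summary parse_title_and_summary parse_title_and_summary_alt
  simp [pvBLoop_false]
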